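-- pv_equiv track=rewrite | github.com/Rupanshu-Kapoor/PythonChallenges | DSA/Coursera/Course1- Alorithm Toolbox/Greedy Algos.py | celebrationParty
-- ===== SOURCE A (Python) =====
-- def celebrationParty(children: list[int]):
--     """
--     :param children: Age of Children
--     :return: Groups of children where in each group age difference between any two student is atlmost 2.
--     """
--     children.sort()
--     group = []
--     i = 0
--     while children:
--         n_group = [x for x in children if children[i] + 2 >= x]
--         group.append(n_group)
--         for j in n_group:
--             children.remove(j)
--     return group
-- ===== SOURCE B (Python) =====
-- def celebrationParty(children):
--     # One pass over the sorted ages; equivalence with A is about the RETURN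
--     # value only (A sorts and empties `children` in place, B does not mutate it).
--     groups = []
--     for x in sorted(children):
--         if groups and x <= groups[-1][0] + 2:
--             groups[-1].append(x)
--         else:
--             groups.append([x])
--     return groups
-- ===== Notes on version B (the rewrite author's own statement) =====
-- stated objective: faster
-- what changed: Replaces the quadratic while-loop that repeatedly filters and list.remove()s the remaining children with a single linear sweep over the sorted list that extends the last group or opens a new one.
import Mathlib
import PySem

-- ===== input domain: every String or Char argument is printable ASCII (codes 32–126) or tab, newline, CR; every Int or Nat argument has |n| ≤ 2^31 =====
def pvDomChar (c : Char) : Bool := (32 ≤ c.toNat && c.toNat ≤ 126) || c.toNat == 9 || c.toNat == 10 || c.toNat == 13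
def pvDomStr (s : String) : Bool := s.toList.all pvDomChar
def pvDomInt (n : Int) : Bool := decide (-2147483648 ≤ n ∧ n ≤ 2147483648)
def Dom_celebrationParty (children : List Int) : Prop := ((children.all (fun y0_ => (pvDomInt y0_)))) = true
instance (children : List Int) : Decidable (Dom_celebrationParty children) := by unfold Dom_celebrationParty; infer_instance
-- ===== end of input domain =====

-- B replaces A's quadratic filter-and-remove while-loop by a single linear sweep over the
-- sorted list (asymptotically faster); equivalence is about the RETURN value only
-- (the Python A sorts `children` in place and empties it; B does not mutate it).

-- ===== PORT A =====

-- helper for termination of A's while-loop: one remove step never grows the list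
theorem pvRemoveStep_le (l : List Int) (j : Int) :
    ((PySem.List.remove? l j).getD l).length ≤ l.length := by
  cases h : PySem.List.remove? l j with
  | none => simp
  | some r =>
      have hj : j ∈ l := by
        by_contra hm
        rw [(PySem.List.remove?_eq_none_iff l j).mpr hm] at h; cases h
      rw [PySem.List.remove?_eq_some_erase l j hj] at h
      cases h
      simp only [Option.getD_some]
      exact List.length_erase_le

theorem pvRemoveFold_le (ng : List Int) (c : List Int) :
    (ng.foldl (fun acc j => (PySem.List.remove? acc j).getD acc) c).length ≤ c.length := by
  induction ng generalizing c with
  | nil => simp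
  | cons a t ih =>
      simp only [List.foldl_cons]
      exact le_trans (ih _) (pvRemoveStep_le c a)

theorem pvRemoveFold_lt (ng : List Int) (c : List Int) (j : Int)
    (hj : j ∈ c) (hng : ng ≠ []) (hhead : ng.headD 0 = j) :
    (ng.foldl (fun acc j => (PySem.List.remove? acc j).getD acc) c).length < c.length := by
  cases ng with
  | nil => exact absurd rfl hng
  | cons a t =>
      simp only [List.headD_cons] at hhead
      subst hhead
      simp only [List.foldl_cons]
      have h1 : ((PySem.List.remove? c a).getD c).length < c.length := by
        rw [PySem.List.remove?_eq_some_erase c a hj]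
        have h2 := List.length_erase_of_mem hj
        have h3 : 0 < c.length := List.length_pos_of_mem hj
        simp only [Option.getD_some]
        omega
      exact lt_of_le_of_lt (pvRemoveFold_le t _) h1

-- the while-loop of A: filter the current group, append it, remove its members
def pvLoopA (c : List Int) (group : List (List Int)) : List (List Int) :=
  if _hc : c = [] then group
  else
    let ng := c.filter (fun x => decide ((PySem.List.pyGet? c 0).getD 0 + 2 ≥ x))
    pvLoopA (ng.foldl (fun acc j => (PySem.List.remove? acc j).getD acc) c) (group ++ [ng])
termination_by c.length
decreasing_by
  cases c with
  | nil => exact absurd rfl _hc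
  | cons h t =>
      apply pvRemoveFold_lt _ _ h (List.mem_cons_self)
      · simp [PySem.List.pyGet?, PySem.List.pyIdx?]
      · simp [PySem.List.pyGet?, PySem.List.pyIdx?]

def celebrationParty (children : List Int) : List (List Int) :=
  pvLoopA (PySem.List.sorted children (fun x => x) false) []

-- ===== PORT B =====

-- one step of B's sweep: extend the last group if x fits, else open a new one
def pvStepB (groups : List (List Int)) (x : Int) : List (List Int) :=
  match groups.getLast? with
  | some g => if x ≤ g.headD 0 + 2 then groups.dropLast ++ [g ++ [x]] else groups ++ [[x]]
  | none => [[x]]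

def celebrationParty_alt (children : List Int) : List (List Int) :=
  List.foldl pvStepB [] (PySem.List.sorted children (fun x => x) false)

-- ===== PRECONDITION & SPEC =====
def Spec_celebrationParty (children : List Int) (out : List (List Int)) : Prop := out = celebrationParty_alt children
instance (children : List Int) (out : List (List Int)) : Decidable (Spec_celebrationParty children out) := by unfold Spec_celebrationParty; infer_instance

-- ===== CLAIM (what is proved, stated in full; the proofs are below) =====
def Claim_equal_celebrationParty : Prop := ∀ (children : List Int), Dom_celebrationParty children → Spec_celebrationParty children (celebrationParty children)

-- ===== LEMMAS AND PROOFS =====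

-- canonical grouping of a sorted list: first group = maximal prefix within head+2
def pvGrp : List Int → List (List Int)
  | [] => []
  | h :: t =>
      ((h :: t).takeWhile (fun x => decide (h + 2 ≥ x))) ::
        pvGrp ((h :: t).dropWhile (fun x => decide (h + 2 ≥ x)))
termination_by l => l.length
decreasing_by
  simp only [List.dropWhile_cons, decide_eq_true_eq]
  rw [if_pos (by omega)]
  exact Nat.lt_succ_of_le (List.length_dropWhile_le _ _)

-- removing, in order, the elements of a prefix leaves exactly the suffix
theorem pvRemoveFold_prefix (pre : List Int) :
    ∀ (suf c : List Int), c = pre ++ suf →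
      pre.foldl (fun acc j => (PySem.List.remove? acc j).getD acc) c = suf := by
  induction pre with
  | nil => intro suf c hc; simpa using hc
  | cons a t ih =>
      intro suf c hc
      subst hc
      simp only [List.cons_append, List.foldl_cons, PySem.List.remove?_cons_self, Option.getD_some]
      exact ih suf _ rfl

-- on a sorted list, filtering by the downward-closed bound equals taking the prefix
theorem pvFilter_eq_takeWhile (b : Int) (c : List Int) (hs : c.Pairwise (· ≤ ·)) :
    c.filter (fun x => decide (b + 2 ≥ x)) = c.takeWhile (fun x => decide (b + 2 ≥ x)) := by
  induction c with
  | nil => rfl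
  | cons a t ih =>
      rcases List.pairwise_cons.mp hs with ⟨ha, ht⟩
      by_cases hab : b + 2 ≥ a
      · simp only [List.filter_cons, List.takeWhile_cons, hab, decide_true]
        exact congrArg (a :: ·) (ih ht)
      · simp only [List.filter_cons, List.takeWhile_cons, decide_eq_true_eq, if_neg hab]
        rw [List.filter_eq_nil_iff.mpr]
        intro x hx
        simp only [decide_eq_true_eq]
        have := ha x hx
        omega

-- A's loop computes the canonical grouping of a sorted list
theorem pvLoopA_eq_grp (c : List Int) (hs : c.Pairwise (· ≤ ·)) :
    ∀ G : List (List Int), pvLoopA c G = G ++ pvGrp c := by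
  induction hn : c.length using Nat.strong_induction_on generalizing c with
  | _ n ih =>
    intro G
    cases c with
    | nil => simp [pvLoopA, pvGrp]
    | cons h t =>
      rw [pvLoopA]
      rw [dif_neg (by simp)]
      have hget : (PySem.List.pyGet? (h :: t) 0).getD 0 = h := by
        simp [PySem.List.pyGet?, PySem.List.pyIdx?]
      rw [hget]
      set p : Int → Bool := fun x => decide (h + 2 ≥ x) with hp
      have hfil : (h :: t).filter p = (h :: t).takeWhile p := pvFilter_eq_takeWhile h _ hs
      rw [hfil]
      have hsplit : (h :: t).takeWhile p ++ (h :: t).dropWhile p = h :: t :=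
        List.takeWhile_append_dropWhile
      have hrem :
          ((h :: t).takeWhile p).foldl (fun acc j => (PySem.List.remove? acc j).getD acc)
            (h :: t) = (h :: t).dropWhile p := by
        exact pvRemoveFold_prefix _ _ _ hsplit.symm
      show pvLoopA
          (List.foldl (fun acc j => (PySem.List.remove? acc j).getD acc) (h :: t)
            (List.takeWhile p (h :: t))) (G ++ [List.takeWhile p (h :: t)]) = G ++ pvGrp (h :: t)
      rw [hrem]
      have hdsort : ((h :: t).dropWhile p).Pairwise (· ≤ ·) :=
        List.Pairwise.sublist (List.dropWhile_sublist _) hs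
      have hdlt : ((h :: t).dropWhile p).length < n := by
        subst hn
        simp only [List.dropWhile_cons, hp, decide_eq_true_eq]
        rw [if_pos (by omega)]
        exact Nat.lt_succ_of_le (List.length_dropWhile_le _ _)
      rw [ih _ hdlt _ hdsort rfl]
      rw [pvGrp]
      simp only [List.append_assoc, List.singleton_append]
      rfl

-- B's sweep, once a nonempty last group with head h exists, continues the canonical grouping
theorem pvFoldB_inv (xs : List Int) :
    ∀ (G : List (List Int)) (h : Int) (g' : List Int),
      List.foldl pvStepB (G ++ [h :: g']) xs =
        G ++ ((h :: g' ++ xs.takeWhile (fun x => decide (h + 2 ≥ x))) ::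
          pvGrp (xs.dropWhile (fun x => decide (h + 2 ≥ x)))) := by
  induction xs with
  | nil => intro G h g'; simp [pvGrp]
  | cons x t ih =>
    intro G h g'
    simp only [List.foldl_cons]
    have hlast : (G ++ [h :: g']).getLast? = some (h :: g') := by
      simp
    by_cases hx : x ≤ h + 2
    · have hstep : pvStepB (G ++ [h :: g']) x = G ++ [h :: (g' ++ [x])] := by
        simp [pvStepB, hlast, hx]
      rw [hstep, ih G h (g' ++ [x])]
      simp only [List.takeWhile_cons, List.dropWhile_cons, decide_eq_true_eq]
      rw [if_pos (by omega), if_pos (by omega)]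
      simp
    · have hstep : pvStepB (G ++ [h :: g']) x = (G ++ [h :: g']) ++ [[x]] := by
        simp [pvStepB, hlast, hx]
      rw [hstep]
      have : ([x] : List Int) = (x :: []) := rfl
      rw [this, ih (G ++ [h :: g']) x []]
      simp only [List.takeWhile_cons, List.dropWhile_cons, decide_eq_true_eq]
      rw [if_neg (by omega), if_neg (by omega)]
      rw [pvGrp]
      simp only [List.takeWhile_cons, List.dropWhile_cons, decide_eq_true_eq]
      rw [if_pos (by omega), if_pos (by omega)]
      simp

-- B's sweep computes the canonical grouping
theorem pvFoldB_eq_grp (c : List Int) : List.foldl pvStepB [] c = pvGrp c := by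
  cases c with
  | nil => simp [pvGrp]
  | cons h t =>
    simp only [List.foldl_cons]
    have hstep : pvStepB [] h = [[h]] := by simp [pvStepB]
    rw [hstep]
    have := pvFoldB_inv t ([] : List (List Int)) h []
    simp only [List.nil_append] at this
    rw [this]
    rw [pvGrp]
    simp only [List.takeWhile_cons, List.dropWhile_cons, decide_eq_true_eq]
    rw [if_pos (by omega), if_pos (by omega)]
    simp

-- ===== VERDICT (by name: the statement is the Claim_ definition above) =====
theorem celebrationParty_spec : Claim_equal_celebrationParty := by
  intro children _
  unfold Spec_celebrationParty celebrationParty celebrationParty_alt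
  rw [pvLoopA_eq_grp _ (PySem.List.sorted_pairwise children (fun x => x) ) [],
      pvFoldB_eq_grp]
  simp
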